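-- pv_equiv track=rewrite | github.com/V-SANT/TDA_2024_1C | TP3/validador_problema_mw.py | validar_multiway_partition_problem
-- ===== SOURCE A (Python) =====
-- def validar_multiway_partition_problem(A, k, subconjuntos):
--
--     def contar(conjunto):
--         contador = {}
--         for elemento in conjunto:
--             contador[elemento] = contador.get(elemento, 0) + 1
--         return contador
--
--     if len(subconjuntos) != k:
--         return False
--
--     elementos_cubiertos = []
--
--     suma_objetivo = sum(subconjuntos[0])
--
--     for subconjunto in subconjuntos:
--         suma = 0
--         for elemento in subconjunto:
--             if elemento not in A:
--                 return False
--             elementos_cubiertos.append(elemento)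
--             suma += elemento
--
--         if suma != suma_objetivo:
--             return False
--
--     return contar(A) == contar(elementos_cubiertos)
-- ===== SOURCE B (Python) =====
-- def validar_multiway_partition_problem(A, k, subconjuntos):
--     if len(subconjuntos) != k:
--         return False
--     objetivo = sum(subconjuntos[0])
--     if any(sum(s) != objetivo for s in subconjuntos):
--         return False
--     todos = [e for s in subconjuntos for e in s]
--     return sorted(todos) == sorted(A)
-- ===== Notes on version B (the rewrite author's own statement) =====
-- stated objective: simpler
-- what changed: Replaces A's interleaved membership checks, covered-list accumulation and two hand-built counting dicts with a separate equal-sum pass followed by a single sorted-list comparison of the flattened subsets against A.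
import Mathlib
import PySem

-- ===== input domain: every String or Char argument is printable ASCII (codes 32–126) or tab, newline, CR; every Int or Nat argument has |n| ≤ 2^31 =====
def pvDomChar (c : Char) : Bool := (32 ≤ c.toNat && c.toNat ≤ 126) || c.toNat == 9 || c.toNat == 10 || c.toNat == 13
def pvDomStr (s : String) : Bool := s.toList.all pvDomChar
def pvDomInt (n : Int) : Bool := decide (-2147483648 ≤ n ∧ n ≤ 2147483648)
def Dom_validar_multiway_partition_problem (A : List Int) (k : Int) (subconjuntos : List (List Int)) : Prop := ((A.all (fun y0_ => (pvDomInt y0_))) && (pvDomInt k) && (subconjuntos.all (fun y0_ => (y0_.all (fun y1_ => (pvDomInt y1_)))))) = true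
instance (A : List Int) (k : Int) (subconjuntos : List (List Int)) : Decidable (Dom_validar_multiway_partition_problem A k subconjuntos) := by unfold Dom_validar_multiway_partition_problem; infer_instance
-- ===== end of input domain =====

-- B replaces A's interleaved membership checks, covered-list accumulation and hand-built counting
-- dicts by a separate equal-sum pass plus one sorted-list comparison of the flattened subsets vs A.

-- ===== PORT A =====
-- A's local helper contar: hand-built counting dict
def pvContar (conjunto : List Int) : PySem.Dict Int Int :=
  conjunto.foldl (fun d e => d.insert e (d.getD e 0 + 1)) PySem.Dict.empty

-- A's inner 'for elemento in subconjunto' loop; none = the early 'return False' (elemento not in A)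
def pvSubLoop (A : List Int) : List Int → List Int → Int → Option (List Int × Int)
  | [], cub, suma => some (cub, suma)
  | e :: rest, cub, suma =>
      if A.contains e then pvSubLoop A rest (cub ++ [e]) (suma + e) else none

-- A's outer 'for subconjunto in subconjuntos' loop; none = an early 'return False'
def pvMainLoop (A : List Int) (objetivo : Int) : List (List Int) → List Int → Option (List Int)
  | [], cub => some cub
  | s :: rest, cub =>
      match pvSubLoop A s cub 0 with
      | none => none
      | some (cub', suma) => if suma ≠ objetivo then none else pvMainLoop A objetivo rest cub'

-- Python's dict == : same keys, same values (order-insensitive)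
def pvDictEq (d1 d2 : PySem.Dict Int Int) : Bool :=
  d1.items.all (fun p => d2.get? p.1 == some p.2) && d2.items.all (fun p => d1.get? p.1 == some p.2)

def validar_multiway_partition_problem (A : List Int) (k : Int) (subconjuntos : List (List Int)) : Bool :=
  if (subconjuntos.length : Int) ≠ k then false
  else
    -- sum(subconjuntos[0]); subconjuntos = [] here is excluded by Pre_ (IndexError)
    let objetivo := (subconjuntos.headD []).sum
    match pvMainLoop A objetivo subconjuntos [] with
    | none => false
    | some cubiertos => pvDictEq (pvContar A) (pvContar cubiertos)

-- ===== PORT B =====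
def validar_multiway_partition_problem_alt (A : List Int) (k : Int) (subconjuntos : List (List Int)) : Bool :=
  if (subconjuntos.length : Int) ≠ k then false
  else
    -- sum(subconjuntos[0]); subconjuntos = [] here is excluded by Pre_ (IndexError)
    let objetivo := (subconjuntos.headD []).sum
    if subconjuntos.any (fun s => s.sum ≠ objetivo) then false
    else
      let todos := subconjuntos.flatten
      PySem.List.sorted todos (fun x => x) false == PySem.List.sorted A (fun x => x) false

-- ===== PRECONDITION & SPEC =====
-- Pre_ excludes only subconjuntos = [] with k = 0, where A (and B) raise IndexError on subconjuntos[0].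
def Pre_validar_multiway_partition_problem (A : List Int) (k : Int) (subconjuntos : List (List Int)) : Prop :=
  ¬(subconjuntos = [] ∧ k = 0)
instance (A : List Int) (k : Int) (subconjuntos : List (List Int)) : Decidable (Pre_validar_multiway_partition_problem A k subconjuntos) := by unfold Pre_validar_multiway_partition_problem; infer_instance
def pvWitness_validar_multiway_partition_problem : List Int × Int × List (List Int) := ([1, 2, 3], 2, [[1, 2], [3]])
def Spec_validar_multiway_partition_problem (A : List Int) (k : Int) (subconjuntos : List (List Int)) (out : Bool) : Prop := out = validar_multiway_partition_problem_alt A k subconjuntos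
instance (A : List Int) (k : Int) (subconjuntos : List (List Int)) (out : Bool) : Decidable (Spec_validar_multiway_partition_problem A k subconjuntos out) := by unfold Spec_validar_multiway_partition_problem; infer_instance

-- ===== CLAIM (what is proved, stated in full; the proofs are below) =====
def Claim_equal_validar_multiway_partition_problem : Prop := ∀ (A : List Int) (k : Int) (subconjuntos : List (List Int)), Dom_validar_multiway_partition_problem A k subconjuntos → Pre_validar_multiway_partition_problem A k subconjuntos → Spec_validar_multiway_partition_problem A k subconjuntos (validar_multiway_partition_problem A k subconjuntos)

-- ===== LEMMAS AND PROOFS =====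

lemma pvSubLoop_eq (A s : List Int) (cub : List Int) (suma : Int) :
    pvSubLoop A s cub suma =
      if s.all A.contains then some (cub ++ s, suma + s.sum) else none := by
  induction s generalizing cub suma with
  | nil => simp [pvSubLoop]
  | cons e rest ih =>
      simp only [pvSubLoop]
      by_cases h : A.contains e
      · rw [if_pos h, ih]
        simp only [List.all_cons, h, Bool.true_and, List.sum_cons, List.append_assoc,
          List.singleton_append]
        split_ifs with h2
        · simp [add_assoc]
        · rfl
      · rw [if_neg h]
        have h' : e ∉ A := by simpa using h
        simp [List.all_cons, h']

lemma pvMainLoop_eq (A : List Int) (obj : Int) (ss : List (List Int)) (cub : List Int) :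
    pvMainLoop A obj ss cub =
      if ss.all (fun s => s.all A.contains && s.sum == obj) then some (cub ++ ss.flatten) else none := by
  induction ss generalizing cub with
  | nil => simp [pvMainLoop]
  | cons s rest ih =>
      simp only [pvMainLoop, pvSubLoop_eq, List.all_cons]
      by_cases h1 : s.all A.contains
      · simp only [h1, if_true]
        by_cases h2 : s.sum = obj
        · simp [h2, ih, List.flatten_cons]
        · simp [h2]
      · simp [h1]

lemma pvContar_eq_counter (l : List Int) : pvContar l = PySem.Dict.counter l :=
  PySem.Dict.foldl_insert_getD_add_one_eq_counter l

lemma counter_get?_of_mem {l : List Int} {x : Int} (h : x ∈ l) :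
    (PySem.Dict.counter l).get? x = some (l.count x : Int) := by
  apply PySem.Dict.get?_of_mem_items
  · rw [PySem.Dict.items_counter]
    exact List.mem_map_of_mem ((PySem.Set.mem_ofList l x).mpr h)
  · exact PySem.Dict.nodup_keys_counter l

lemma counter_get?_of_not_mem {l : List Int} {x : Int} (h : x ∉ l) :
    (PySem.Dict.counter l).get? x = none := by
  rw [PySem.Dict.get?_eq_none_iff_contains, PySem.Dict.contains_counter]
  simpa using h

lemma pvDictEq_counter_iff (l1 l2 : List Int) :
    pvDictEq (PySem.Dict.counter l1) (PySem.Dict.counter l2) = true ↔ l1.Perm l2 := by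
  rw [List.perm_iff_count]
  constructor
  · intro h x
    simp only [pvDictEq, Bool.and_eq_true, List.all_eq_true] at h
    obtain ⟨h1, h2⟩ := h
    by_cases hx1 : x ∈ l1
    · have := h1 (x, (l1.count x : Int)) (by
        rw [PySem.Dict.items_counter]
        exact List.mem_map_of_mem ((PySem.Set.mem_ofList l1 x).mpr hx1))
      by_cases hx2 : x ∈ l2
      · rw [counter_get?_of_mem hx2] at this
        simp only [beq_iff_eq, Option.some.injEq] at this
        exact_mod_cast this.symm
      · rw [counter_get?_of_not_mem hx2] at this
        simp at this
    · by_cases hx2 : x ∈ l2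
      · have := h2 (x, (l2.count x : Int)) (by
          rw [PySem.Dict.items_counter]
          exact List.mem_map_of_mem ((PySem.Set.mem_ofList l2 x).mpr hx2))
        rw [counter_get?_of_not_mem hx1] at this
        simp at this
      · simp [List.count_eq_zero_of_not_mem hx1, List.count_eq_zero_of_not_mem hx2]
  · intro h
    simp only [pvDictEq, Bool.and_eq_true, List.all_eq_true]
    constructor
    · intro p hp
      rw [PySem.Dict.items_counter] at hp
      obtain ⟨x, hx, rfl⟩ := List.mem_map.mp hp
      have hx1 : x ∈ l1 := (PySem.Set.mem_ofList l1 x).mp hx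
      have hx2 : x ∈ l2 := by
        rw [← List.count_pos_iff, ← h x, List.count_pos_iff]; exact hx1
      simp [counter_get?_of_mem hx2, h x]
    · intro p hp
      rw [PySem.Dict.items_counter] at hp
      obtain ⟨x, hx, rfl⟩ := List.mem_map.mp hp
      have hx2 : x ∈ l2 := (PySem.Set.mem_ofList l2 x).mp hx
      have hx1 : x ∈ l1 := by
        rw [← List.count_pos_iff, h x, List.count_pos_iff]; exact hx2
      simp [counter_get?_of_mem hx1, h x]

-- if every subset sums to obj and flatten is a permutation of A, every element is in A
lemma mem_of_perm {ss : List (List Int)} {A : List Int} (hperm : ss.flatten.Perm A)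
    {s : List Int} (hs : s ∈ ss) {e : Int} (he : e ∈ s) : e ∈ A :=
  hperm.mem_iff.mp (List.mem_flatten.mpr ⟨s, hs, he⟩)

-- ===== VERDICT (by name: the statement is the Claim_ definition above) =====
theorem validar_multiway_partition_problem_spec : Claim_equal_validar_multiway_partition_problem := by
  intro A k ss _ _
  unfold Spec_validar_multiway_partition_problem
  unfold validar_multiway_partition_problem validar_multiway_partition_problem_alt
  by_cases hk : (ss.length : Int) ≠ k
  · simp [hk]
  · simp only [hk, if_false]
    set obj := (ss.headD []).sum with hobj
    rw [pvMainLoop_eq]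
    by_cases hall : ss.all (fun s => s.all A.contains && s.sum == obj)
    · -- A's loop completes
      simp only [hall, if_true, List.nil_append]
      have hsum : (ss.any (fun s => decide ¬(s.sum = obj))) = false := by
        simp only [List.any_eq_false]
        intro s hs
        have := List.all_eq_true.mp hall s hs
        simp only [Bool.and_eq_true, beq_iff_eq] at this
        simp [this.2]
      simp only [hsum]
      rw [pvContar_eq_counter, pvContar_eq_counter]
      by_cases hperm : A.Perm ss.flatten
      · have h1 : pvDictEq (PySem.Dict.counter A) (PySem.Dict.counter ss.flatten) = true :=
          (pvDictEq_counter_iff _ _).mpr hperm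
        have h2 : PySem.List.sorted ss.flatten (fun x => x) false = PySem.List.sorted A (fun x => x) false :=
          (PySem.List.sorted_id_eq_sorted_id_iff_perm _ _).mpr hperm.symm
        simp [h1, h2]
      · have h1 : pvDictEq (PySem.Dict.counter A) (PySem.Dict.counter ss.flatten) = false := by
          rw [Bool.eq_false_iff]
          intro h; exact hperm ((pvDictEq_counter_iff _ _).mp h)
        have h2 : PySem.List.sorted ss.flatten (fun x => x) false ≠ PySem.List.sorted A (fun x => x) false :=
          fun h => hperm (((PySem.List.sorted_id_eq_sorted_id_iff_perm _ _).mp h).symm)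
        simp [h1, h2]
    · -- A's loop returns False early: some subset has a bad sum or an element outside A
      simp only [hall]
      rw [List.all_eq_true] at hall
      push_neg at hall
      obtain ⟨s, hs, hbad⟩ := hall
      have hbad' : ¬(s.all A.contains = true ∧ s.sum = obj) := by simpa using hbad
      rw [not_and_or] at hbad'
      by_cases hsum : ∃ s ∈ ss, s.sum ≠ obj
      · obtain ⟨t, ht, htsum⟩ := hsum
        have : ss.any (fun s => decide ¬(s.sum = obj)) = true :=
          List.any_eq_true.mpr ⟨t, ht, by simpa using htsum⟩
        rw [this]
        simp
      · -- all sums equal obj, so some element of some subset is not in A; then flatten is not a perm of A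
        push_neg at hsum
        have hssum : s.sum = obj := hsum s hs
        rcases hbad' with hbad | hbad
        · have hbadm : ∃ e ∈ s, e ∉ A := by
            simpa [List.all_eq_true] using hbad
          obtain ⟨e, he, heA'⟩ := hbadm
          have hany : ss.any (fun s => decide ¬(s.sum = obj)) = false := by
            simp only [List.any_eq_false]
            intro t ht; simp [hsum t ht]
          simp only [hany]
          have hnp : ¬ ss.flatten.Perm A := fun hp => heA' (mem_of_perm hp hs he)
          have h2 : PySem.List.sorted ss.flatten (fun x => x) false ≠ PySem.List.sorted A (fun x => x) false :=
            fun h => hnp ((PySem.List.sorted_id_eq_sorted_id_iff_perm _ _).mp h)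
          simp [h2]
        · exact absurd hssum hbad
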